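-- pv_equiv track=rewrite | github.com/InfluxGraph/influxgraph | influxgraph/utils.py | calculate_interval
-- ===== SOURCE A (Python) =====
-- def calculate_interval(start_time, end_time, deltas=None):
--     """Calculates wanted data series interval according to start and end times
--
--     Returns interval in seconds
--     :param start_time: Start time in seconds from epoch
--     :param end_time: End time in seconds from epoch
--     :type start_time: int
--     :type end_time: int
--     :param deltas: Delta configuration to use. Defaults hardcoded if no
--       configuration is provided
--     :type deltas: dict(max time range of query in seconds: interval to use
--       in seconds)
--
--     :rtype: int - *Interval in seconds*
--     """
--     time_delta = end_time - start_time
--     deltas = deltas if deltas else {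
--         # 15 min -> 10s
--         900: 10,
--         # 30 min -> 30s
--         1800: 30,
--         # # 1 hour -> 1s
--         # 3600 : 1,
--         # # 1 day -> 30s
--         # 86400 : 30,
--         # 3 days -> 1min
--         259200: 60,
--         # 7 days -> 5min
--         604800: 300,
--         # 14 days -> 10min
--         1209600: 600,
--         # 28 days -> 15min
--         2419200: 900,
--         # 2 months -> 30min
--         4838400: 1800,
--         # 4 months -> 1hour
--         9676800: 3600,
--         # 12 months -> 3hours
--         31536000: 7200,
--         # 4 years -> 12hours
--         126144000: 43200,
--         }
--     for delta in sorted(deltas.keys()):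
--         if time_delta <= delta:
--             return deltas[delta]
--     # 1 day default, or if time range > max configured (4 years default max)
--     return 86400
-- ===== SOURCE B (Python) =====
-- def calculate_interval(start_time, end_time, deltas=None):
--     """One pass over deltas.items() keeping the best (smallest qualifying
--     threshold, interval) pair in an accumulator; no sort, no staged passes."""
--     time_delta = end_time - start_time
--     deltas = deltas if deltas else {
--         900: 10,
--         1800: 30,
--         259200: 60,
--         604800: 300,
--         1209600: 600,
--         2419200: 900,
--         4838400: 1800,
--         9676800: 3600,
--         31536000: 7200,
--         126144000: 43200,
--         }
--     best = None
--     for threshold, interval in deltas.items():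
--         if time_delta <= threshold and (best is None or threshold < best[0]):
--             best = (threshold, interval)
--     return 86400 if best is None else best[1]
-- ===== Notes on version B (the rewrite author's own statement) =====
-- stated objective: alternative
-- what changed: Replaces A's sort of all keys followed by an early-return scan with a single pass over deltas.items() that maintains a best (smallest qualifying threshold, interval) accumulator and needs no sort and no final dictionary lookup.
import Mathlib
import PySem

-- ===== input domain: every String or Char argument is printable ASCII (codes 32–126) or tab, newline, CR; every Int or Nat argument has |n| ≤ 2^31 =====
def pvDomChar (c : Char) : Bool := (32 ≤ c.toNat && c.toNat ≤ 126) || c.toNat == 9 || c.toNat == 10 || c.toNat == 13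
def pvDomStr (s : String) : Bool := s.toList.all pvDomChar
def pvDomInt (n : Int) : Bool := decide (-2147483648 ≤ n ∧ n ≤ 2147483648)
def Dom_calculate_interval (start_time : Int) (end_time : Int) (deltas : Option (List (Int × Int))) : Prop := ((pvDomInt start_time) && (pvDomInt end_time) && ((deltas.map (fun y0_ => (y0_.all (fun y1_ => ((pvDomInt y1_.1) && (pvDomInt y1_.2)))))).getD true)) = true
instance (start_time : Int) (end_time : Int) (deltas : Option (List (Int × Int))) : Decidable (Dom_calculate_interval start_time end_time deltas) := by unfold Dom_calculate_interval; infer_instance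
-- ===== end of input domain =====

-- B replaces A's sort-of-all-keys + early-return scan with a single pass over the
-- dict's items keeping a best (smallest qualifying threshold, interval) accumulator
-- (objective: alternative single-pass decomposition; no sort, no final lookup).

-- ===== PORT A =====
-- the hardcoded default delta configuration (shared Python literal)
def pvDefaultDeltas : List (Int × Int) :=
  [(900, 10), (1800, 30), (259200, 60), (604800, 300), (1209600, 600),
   (2419200, 900), (4838400, 1800), (9676800, 3600), (31536000, 7200), (126144000, 43200)]

-- `deltas if deltas else {…}`: None and the empty dict fall back to the default
def pvEffDeltas (deltas : Option (List (Int × Int))) : PySem.Dict Int Int :=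
  PySem.Dict.ofList (match deltas with
    | none => pvDefaultDeltas
    | some l => if l = [] then pvDefaultDeltas else l)

-- A's `for delta in sorted(deltas.keys()): if time_delta <= delta: return deltas[delta]`
-- `deltas[delta]` never raises (the key comes from keys), so the .getD 0 default is unreachable
def pvScanA (d : PySem.Dict Int Int) (td : Int) : List Int → Int
  | [] => 86400
  | k :: ks => if td ≤ k then (PySem.Dict.get? d k).getD 0 else pvScanA d td ks

def calculate_interval (start_time : Int) (end_time : Int) (deltas : Option (List (Int × Int))) : Int :=
  let td := end_time - start_time
  let d := pvEffDeltas deltas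
  pvScanA d td (PySem.List.sorted (PySem.Dict.keys d) (fun x => x) false)

-- ===== PORT B =====
-- loop body: `if time_delta <= threshold and (best is None or threshold < best[0]): best = (threshold, interval)`
-- (the `or` is short-circuit: matched on `best` first)
def pvStep (td : Int) (best : Option (Int × Int)) (kv : Int × Int) : Option (Int × Int) :=
  match best with
  | none => if td ≤ kv.1 then some kv else none
  | some b => if td ≤ kv.1 ∧ kv.1 < b.1 then some kv else some b

def calculate_interval_alt (start_time : Int) (end_time : Int) (deltas : Option (List (Int × Int))) : Int :=
  let td := end_time - start_time
  let d := pvEffDeltas deltas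
  match d.items.foldl (pvStep td) none with
  | none => 86400
  | some b => b.2

-- ===== PRECONDITION & SPEC =====
def Spec_calculate_interval (start_time : Int) (end_time : Int) (deltas : Option (List (Int × Int))) (out : Int) : Prop := out = calculate_interval_alt start_time end_time deltas
instance (start_time : Int) (end_time : Int) (deltas : Option (List (Int × Int))) (out : Int) : Decidable (Spec_calculate_interval start_time end_time deltas out) := by unfold Spec_calculate_interval; infer_instance

-- ===== CLAIM (what is proved, stated in full; the proofs are below) =====
def Claim_equal_calculate_interval : Prop := ∀ (start_time : Int) (end_time : Int) (deltas : Option (List (Int × Int))), Dom_calculate_interval start_time end_time deltas → Spec_calculate_interval start_time end_time deltas (calculate_interval start_time end_time deltas)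

-- ===== LEMMAS AND PROOFS =====

-- ---- A side: the early-return scan over the sorted keys ----

-- A's early-return scan is the first key satisfying the test
theorem pvScanA_eq_find? (d : PySem.Dict Int Int) (td : Int) (l : List Int) :
    pvScanA d td l = match l.find? (fun k => decide (td ≤ k)) with
      | some k => (PySem.Dict.get? d k).getD 0
      | none => 86400 := by
  induction l with
  | nil => rfl
  | cons k ks ih =>
    by_cases h : td ≤ k
    · simp [pvScanA, h, List.find?_cons_of_pos]
    · simp [pvScanA, h, List.find?_cons_of_neg, ih]

-- first match = head of the filtered list (any list)
theorem pv_find?_eq_head?_filter {α : Type} (p : α → Bool) (l : List α) :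
    l.find? p = (l.filter p).head? := by
  induction l with
  | nil => rfl
  | cons x xs ih =>
    cases h : p x
    · rw [List.find?_cons_of_neg (by simp [h]), ih, List.filter_cons, if_neg (by simp [h])]
    · rw [List.find?_cons_of_pos h, List.filter_cons, if_pos h]
      rfl

-- ---- B side: the one-pass accumulator loop computes the min of the qualifying keys ----

-- key-only shadow of the loop
def pvStepK (td : Int) (best : Option Int) (k : Int) : Option Int :=
  match best with
  | none => if td ≤ k then some k else none
  | some a => if td ≤ k ∧ k < a then some k else some a

-- the pair loop over (k, g k) pairs only ever consults keys
theorem pv_fold_map (td : Int) (g : Int → Int) (ks : List Int) (o : Option Int) :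
    (ks.map (fun k => (k, g k))).foldl (pvStep td) (o.map (fun k => (k, g k))) =
    (ks.foldl (pvStepK td) o).map (fun k => (k, g k)) := by
  induction ks generalizing o with
  | nil => rfl
  | cons k t ih =>
    have hstep : pvStep td (o.map (fun k => (k, g k))) (k, g k) =
        (pvStepK td o k).map (fun k => (k, g k)) := by
      cases o with
      | none => simp only [Option.map_none, pvStep, pvStepK]; split_ifs <;> rfl
      | some a => simp only [Option.map_some, pvStep, pvStepK]; split_ifs <;> rfl
    simp only [List.map_cons, List.foldl_cons, hstep, ih]

-- with a some-accumulator the key loop is a running min over the qualifying keys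
theorem pv_foldK_some (td : Int) (ks : List Int) (a : Int) :
    ks.foldl (pvStepK td) (some a) = some ((ks.filter (fun k => decide (td ≤ k))).foldl min a) := by
  induction ks generalizing a with
  | nil => rfl
  | cons k t ih =>
    by_cases h : td ≤ k
    · have hst : pvStepK td (some a) k = some (min a k) := by
        simp only [pvStepK]
        split_ifs with hc
        · simp [min_eq_right (le_of_lt hc.2)]
        · have : ¬ k < a := fun hk => hc ⟨h, hk⟩
          simp [min_eq_left (le_of_not_gt this)]
      simp [h, hst, ih]
    · have hst : pvStepK td (some a) k = some a := by simp [pvStepK, h]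
      simp [h, hst, ih]

-- from an empty accumulator: none iff no key qualifies, else the running min
theorem pv_foldK_none (td : Int) (ks : List Int) :
    ks.foldl (pvStepK td) none =
    (match ks.filter (fun k => decide (td ≤ k)) with
      | [] => none
      | x :: t => some (t.foldl min x)) := by
  induction ks with
  | nil => rfl
  | cons k t ih =>
    by_cases h : td ≤ k
    · have hst : pvStepK td none k = some k := by simp [pvStepK, h]
      simp [h, hst, pv_foldK_some]
    · have hst : pvStepK td none k = none := by simp [pvStepK, h]
      simp [h, hst, ih]

-- ---- running-min facts ----

theorem pv_foldl_min_le_init (l : List Int) (b : Int) : l.foldl min b ≤ b := by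
  induction l generalizing b with
  | nil => exact le_refl b
  | cons c cs ih =>
    simp only [List.foldl_cons]
    exact (ih (min b c)).trans (min_le_left b c)

theorem pv_foldl_min_le (l : List Int) (b z : Int) (h : z = b ∨ z ∈ l) :
    l.foldl min b ≤ z := by
  induction l generalizing b with
  | nil =>
    rcases h with h | h
    · exact h ▸ le_refl b
    · cases h
  | cons c cs ih =>
    simp only [List.foldl_cons]
    rcases h with h | h
    · exact h ▸ (pv_foldl_min_le_init cs (min b c)).trans (min_le_left b c)
    · rcases List.mem_cons.mp h with h | h
      · exact h ▸ (pv_foldl_min_le_init cs (min b c)).trans (min_le_right b c)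
      · exact ih (min b c) (Or.inr h)

theorem pv_le_foldl_min (l : List Int) (b x : Int) (hb : x ≤ b) (hl : ∀ z ∈ l, x ≤ z) :
    x ≤ l.foldl min b := by
  induction l generalizing b with
  | nil => exact hb
  | cons c cs ih =>
    simp only [List.foldl_cons]
    exact ih (min b c) (le_min hb (hl c (List.mem_cons_self ..)))
      (fun z hz => hl z (List.mem_cons_of_mem _ hz))

-- the core equality for any dict with unique keys and any time delta
theorem pv_core (d : PySem.Dict Int Int) (td : Int) (hnd : d.keys.Nodup) :
    pvScanA d td (PySem.List.sorted (PySem.Dict.keys d) (fun x => x) false) =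
    (match d.items.foldl (pvStep td) none with
      | none => 86400
      | some b => b.2) := by
  have hitems : d.items = d.keys.map (fun k => (k, d.getD k 0)) :=
    PySem.Dict.items_eq_map_keys d hnd 0
  have hB : d.items.foldl (pvStep td) none =
      (d.keys.foldl (pvStepK td) none).map (fun k => (k, d.getD k 0)) := by
    rw [hitems]
    exact pv_fold_map td (fun k => d.getD k 0) d.keys none
  rw [pvScanA_eq_find?, pv_find?_eq_head?_filter, hB, pv_foldK_none]
  have hperm : ((PySem.List.sorted d.keys (fun x => x) false).filter (fun k => decide (td ≤ k))).Perm
      (d.keys.filter (fun k => decide (td ≤ k))) :=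
    (PySem.List.sorted_perm d.keys (fun x => x) false).filter _
  have hpair : ((PySem.List.sorted d.keys (fun x => x) false).filter (fun k => decide (td ≤ k))).Pairwise (fun a b => a ≤ b) :=
    (PySem.List.sorted_pairwise d.keys (fun x => x)).filter _
  cases hsf : (PySem.List.sorted d.keys (fun x => x) false).filter (fun k => decide (td ≤ k)) with
  | nil =>
    have hkf : d.keys.filter (fun k => decide (td ≤ k)) = [] := by
      rw [hsf] at hperm
      exact List.Perm.eq_nil hperm.symm
    simp [hkf]
  | cons x t =>
    cases hkf : d.keys.filter (fun k => decide (td ≤ k)) with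
    | nil =>
      exfalso
      rw [hsf, hkf] at hperm
      have := hperm.length_eq
      simp at this
    | cons y u =>
      have hperm' : (x :: t).Perm (y :: u) := by rw [hsf, hkf] at hperm; exact hperm
      have hpair' : (x :: t).Pairwise (fun a b => a ≤ b) := by rw [hsf] at hpair; exact hpair
      -- x is ≤ every element of y :: u, and x is one of them
      have hxall : ∀ z ∈ y :: u, x ≤ z := by
        intro z hz
        rcases List.mem_cons.mp (hperm'.mem_iff.mpr hz) with h | h
        · exact le_of_eq h.symm
        · exact (List.pairwise_cons.mp hpair').1 z h
      have hxmem : x ∈ y :: u := hperm'.mem_iff.mp (List.mem_cons_self ..)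
      have hmin : u.foldl min y = x := by
        refine le_antisymm (pv_foldl_min_le u y x ?_) ?_
        · rcases List.mem_cons.mp hxmem with h | h
          · exact Or.inl h
          · exact Or.inr h
        · exact pv_le_foldl_min u y x (hxall y (List.mem_cons_self ..))
            (fun z hz => hxall z (List.mem_cons_of_mem _ hz))
      simp [hmin, PySem.Dict.getD_eq_get?_getD]

-- keys of pvEffDeltas are unique (built by ofList)
theorem pv_nodup_eff (deltas : Option (List (Int × Int))) : (pvEffDeltas deltas).keys.Nodup := by
  unfold pvEffDeltas
  exact PySem.Dict.nodup_keys_ofList _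

-- ===== VERDICT (by name: the statement is the Claim_ definition above) =====
theorem calculate_interval_spec : Claim_equal_calculate_interval := by
  intro s e deltas _
  unfold Spec_calculate_interval calculate_interval calculate_interval_alt
  exact pv_core (pvEffDeltas deltas) (e - s) (pv_nodup_eff deltas)
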